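-- pv_equiv track=rewrite | github.com/AploCoin/BlockChainTree | gen_test_data.py | total_leading_zeros
-- ===== SOURCE A (Python) =====
-- def leading_zeros(num):
--     if num == 0:
--         return 8
--
--     leading_zeros = 0
--     while num & 0b10000000 == 0:
--         leading_zeros += 1
--         num = num << 1
--         num = num & 0b11111111
--     return leading_zeros
--
-- def total_leading_zeros(hash):
--     to_return = 0
--     for byte in hash:
--         l_zeros = leading_zeros(byte)
--         to_return += l_zeros
--         if l_zeros < 8:
--             break
--
--     return to_return
-- ===== SOURCE B (Python) =====
-- def total_leading_zeros(hash):
--     n = int.from_bytes(bytes(b & 0xFF for b in hash), 'big')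
--     total = 8 * len(hash)
--     return total if n == 0 else total - n.bit_length()
-- ===== Notes on version B (the rewrite author's own statement) =====
-- stated objective: simpler
-- what changed: Replaces the per-byte loop with its inner bit-shifting while-loop by one big-endian integer conversion of the low bytes: the answer is 8*len(hash) minus the bit length of the whole value.
import Mathlib
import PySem

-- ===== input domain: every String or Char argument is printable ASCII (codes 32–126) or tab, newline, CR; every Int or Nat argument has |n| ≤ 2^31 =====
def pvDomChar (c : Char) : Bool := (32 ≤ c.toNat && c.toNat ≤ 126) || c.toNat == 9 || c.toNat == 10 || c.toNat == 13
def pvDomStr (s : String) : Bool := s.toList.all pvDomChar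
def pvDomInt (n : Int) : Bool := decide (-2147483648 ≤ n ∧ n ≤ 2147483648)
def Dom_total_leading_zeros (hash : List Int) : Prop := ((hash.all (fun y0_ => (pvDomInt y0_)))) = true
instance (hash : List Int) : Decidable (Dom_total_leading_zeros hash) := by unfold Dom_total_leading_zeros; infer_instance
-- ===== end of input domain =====

-- B replaces A's per-byte loop (with its inner bit-shifting while-loop and early break)
-- by one big-endian integer conversion of the low bytes: 8*len minus the whole value's bit length.

-- ===== PORT A =====
-- the while-loop of leading_zeros; fuel 8 only makes it total (within Pre_, a reached byte
-- has a nonzero low byte and sets bit 7 within 7 shifts, so the fuel never runs out)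
def lzLoop : Nat → Int → Int → Int
  | 0, _, acc => acc
  | fuel + 1, num, acc =>
    if PySem.Int.band num 128 == 0 then
      lzLoop fuel (PySem.Int.band (num <<< (1 : Nat)) 255) (acc + 1)
    else acc

def leading_zeros_port (num : Int) : Int :=
  if num == 0 then 8 else lzLoop 8 num 0

def total_leading_zeros : List Int → Int
  | [] => 0
  | byte :: rest =>
    let l_zeros := leading_zeros_port byte
    if l_zeros < 8 then l_zeros else l_zeros + total_leading_zeros rest

-- ===== PORT B =====
-- int.from_bytes(bytes(b & 0xFF for b in hash), 'big') ported by hand as a big-endian fold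
-- over the low bytes (exact: b & 0xFF is PySem.Int.band b 255); n.bit_length() is
-- PySem.Int.bitLength.
def total_leading_zeros_alt (hash : List Int) : Int :=
  let n : Int := hash.foldl (fun acc b => acc * 256 + PySem.Int.band b 255) 0
  let total : Int := 8 * hash.length
  if n == 0 then total else total - (PySem.Int.bitLength n : Int)

-- ===== PRECONDITION & SPEC =====
-- Pre_ excludes exactly the lists whose first nonzero element is a multiple of 256: there A's
-- inner while-loop never terminates (the byte is masked to 0 and bit 7 never sets), so A
-- returns nothing to match.
def Pre_total_leading_zeros (hash : List Int) : Prop :=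
  ((hash.dropWhile (fun b => b == 0)).head?.all (fun b => b % 256 != 0)) = true
instance (hash : List Int) : Decidable (Pre_total_leading_zeros hash) := by
  unfold Pre_total_leading_zeros; infer_instance

def pvWitness_total_leading_zeros : List Int := [0, 3, 200]

def Spec_total_leading_zeros (hash : List Int) (out : Int) : Prop := out = total_leading_zeros_alt hash
instance (hash : List Int) (out : Int) : Decidable (Spec_total_leading_zeros hash out) := by unfold Spec_total_leading_zeros; infer_instance

-- ===== CLAIM (what is proved, stated in full; the proofs are below) =====
def Claim_equal_total_leading_zeros : Prop := ∀ (hash : List Int), Dom_total_leading_zeros hash → Pre_total_leading_zeros hash → Spec_total_leading_zeros hash (total_leading_zeros hash)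

-- ===== LEMMAS AND PROOFS =====

-- a & 255 is a mod 256 (Python semantics, also for negative a)
lemma nat_and255 (n : Nat) : n &&& 255 = n % 256 := by
  have := Nat.and_two_pow_sub_one_eq_mod n 8
  norm_num at this
  exact this

lemma band255 (a : Int) : PySem.Int.band a 255 = a % 256 := by
  simp only [PySem.Int.band, show (255:Int).toNat = 255 from rfl]
  split_ifs with h1 h2 h2
  · rw [nat_and255]; omega
  · omega
  · rw [Nat.and_comm, nat_and255]; omega
  · omega

lemma nat_and128 (n : Nat) : n &&& 128 = if n / 128 % 2 = 1 then 128 else 0 := by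
  have h := Nat.and_two_pow n 7
  rw [Nat.testBit_eq_decide_div_mod_eq] at h
  norm_num at h
  by_cases hd : n / 128 % 2 = 1 <;> simp [hd] at h <;> simp [hd, h]

-- a & 128 == 0 iff bit 7 of the low byte is clear
lemma band128_zero_iff (a : Int) : PySem.Int.band a 128 = 0 ↔ a % 256 < 128 := by
  simp only [PySem.Int.band, show (128:Int).toNat = 128 from rfl]
  split_ifs with h1 h2 h2
  · rw [nat_and128 a.toNat]
    split_ifs with hd <;> omega
  · omega
  · rw [Nat.and_comm, nat_and128 (-a - 1).toNat]
    split_ifs with hd <;> omega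
  · omega

-- the inner loop after its first step, over the 256 possible low bytes
set_option maxRecDepth 100000 in
lemma lz_table : ∀ r : Nat, r < 256 → r ≠ 0 →
    (if r < 128 then lzLoop 7 (((2 * r) % 256 : Nat) : Int) 1 else 0)
      = 8 - (PySem.Int.bitLength ((r : Nat) : Int) : Int) := by
  decide

set_option maxRecDepth 100000 in
lemma bl_range : ∀ m : Nat, m < 256 → m ≠ 0 →
    1 ≤ PySem.Int.bitLength ((m : Nat) : Int) ∧ PySem.Int.bitLength ((m : Nat) : Int) ≤ 8 := by
  decide

-- A's helper on any int whose low byte is nonzero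
lemma lz_mod (num : Int) (h : num % 256 ≠ 0) :
    leading_zeros_port num = 8 - (PySem.Int.bitLength (num % 256) : Int) := by
  have hne : num ≠ 0 := by intro hz; subst hz; simp at h
  have hstep : leading_zeros_port num
      = if PySem.Int.band num 128 == 0 then
          lzLoop 7 (PySem.Int.band (num <<< (1 : Nat)) 255) 1 else 0 := by
    simp only [leading_zeros_port, lzLoop]
    rw [if_neg (by simp [hne])]
    norm_num
  set r : Nat := (num % 256).toNat with hrdef
  have hr0 : 0 ≤ num % 256 := Int.emod_nonneg num (by norm_num)
  have hrlt : num % 256 < 256 := Int.emod_lt_of_pos num (by norm_num)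
  have hrc : ((r : Nat) : Int) = num % 256 := by omega
  have hrlt' : r < 256 := by omega
  have hrne : r ≠ 0 := by omega
  have hshift : PySem.Int.band (num <<< (1 : Nat)) 255 = (((2 * r) % 256 : Nat) : Int) := by
    rw [band255, Int.shiftLeft_eq, pow_one, mul_comm num 2]
    have h2 : 2 * num % 256 = 2 * (num % 256) % 256 := by
      rw [Int.mul_emod, Int.mul_emod 2 (num % 256)]
      norm_num
    rw [h2, ← hrc]
    omega
  have := lz_table r hrlt' hrne
  rw [hrc] at this
  rw [hstep, hshift]
  by_cases hlt : num % 256 < 128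
  · rw [if_pos (by rw [beq_iff_eq]; exact (band128_zero_iff num).mpr hlt)]
    rw [if_pos (by omega)] at this
    exact this
  · rw [if_neg (by rw [beq_iff_eq]; exact fun hc => hlt ((band128_zero_iff num).mp hc))]
    rw [if_neg (by omega)] at this
    exact this

-- big-endian fold over the low bytes, with arbitrary accumulator
lemma foldl_be (xs : List Int) (a : Int) :
    xs.foldl (fun acc b => acc * 256 + PySem.Int.band b 255) a
      = a * 256 ^ xs.length + xs.foldl (fun acc b => acc * 256 + PySem.Int.band b 255) 0 := by
  induction xs generalizing a with
  | nil => simp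
  | cons x xs ih =>
    simp only [List.foldl_cons, List.length_cons]
    rw [ih (a * 256 + PySem.Int.band x 255), ih (0 * 256 + PySem.Int.band x 255)]
    ring

lemma foldl_be_nonneg (xs : List Int) :
    0 ≤ xs.foldl (fun acc b => acc * 256 + PySem.Int.band b 255) 0 := by
  induction xs with
  | nil => simp
  | cons x xs ih =>
    rw [List.foldl_cons, foldl_be, band255]
    have hx0 : 0 ≤ x % 256 := Int.emod_nonneg x (by norm_num)
    have : (0 : Int) ≤ (0 * 256 + x % 256) * 256 ^ xs.length :=
      mul_nonneg (by omega) (by positivity)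
    omega

lemma foldl_be_lt (xs : List Int) :
    xs.foldl (fun acc b => acc * 256 + PySem.Int.band b 255) 0 < 256 ^ xs.length := by
  induction xs with
  | nil => simp
  | cons x xs ih =>
    rw [List.foldl_cons, foldl_be, band255]
    have hx0 : 0 ≤ x % 256 := Int.emod_nonneg x (by norm_num)
    have hx1 : x % 256 < 256 := Int.emod_lt_of_pos x (by norm_num)
    have h1 : (0 * 256 + x % 256) * 256 ^ xs.length ≤ 255 * 256 ^ xs.length := by
      have : (0:Int) ≤ 256 ^ xs.length := by positivity
      nlinarith
    have h2 : (256 : Int) ^ (x :: xs).length = 256 * 256 ^ xs.length := by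
      simp [pow_succ]; ring
    omega

-- bitLength is determined by the 2^(L-1) ≤ |n| < 2^L sandwich
lemma bitLength_unique (n : Int) (L : Nat) (h1 : 1 ≤ L)
    (h2 : 2 ^ (L - 1) ≤ n.natAbs) (h3 : n.natAbs < 2 ^ L) :
    PySem.Int.bitLength n = L := by
  have hne : n ≠ 0 := by
    intro h; subst h
    simp only [Int.natAbs_zero] at h2
    have : (0:Nat) < 2 ^ (L-1) := Nat.pow_pos (by norm_num : 0 < 2)
    omega
  have hA := PySem.Int.lt_two_pow_bitLength n
  have hB := PySem.Int.two_pow_bitLength_le n hne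
  set M := PySem.Int.bitLength n with hM
  have hM1 : 1 ≤ M := by
    by_contra h
    have : M = 0 := by omega
    rw [this] at hA
    have : n.natAbs ≠ 0 := Int.natAbs_ne_zero.mpr hne
    omega
  have hLM : L - 1 < M := by
    have : (2:Nat) ^ (L-1) < 2 ^ M := lt_of_le_of_lt h2 hA
    exact (Nat.pow_lt_pow_iff_right (by norm_num)).mp this
  have hML : M - 1 < L := by
    have : (2:Nat) ^ (M-1) < 2 ^ L := lt_of_le_of_lt hB h3
    exact (Nat.pow_lt_pow_iff_right (by norm_num)).mp this
  omega

-- B's value on a cons with nonzero low byte: the whole value's bit length splits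
lemma bitLength_head (b : Int) (v : Int) (k : Nat)
    (hb0 : 0 < b) (hb : b < 256) (hv0 : 0 ≤ v) (hv : v < 256 ^ k) :
    PySem.Int.bitLength (b * 256 ^ k + v)
      = PySem.Int.bitLength b + 8 * k := by
  have hbne : b ≠ 0 := by omega
  have hBle := PySem.Int.two_pow_bitLength_le b hbne
  have hBlt := PySem.Int.lt_two_pow_bitLength b
  set B := PySem.Int.bitLength b with hB
  have hB1 : 1 ≤ B := by
    by_contra h
    have : B = 0 := by omega
    rw [this] at hBlt
    have : b.natAbs ≠ 0 := Int.natAbs_ne_zero.mpr hbne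
    omega
  have hpowN : ((2:Nat)) ^ (8 * k) = 256 ^ k := by
    rw [pow_mul]; norm_num
  have hba : (b.natAbs : Int) = b := Int.natAbs_of_nonneg (by omega)
  have hva : (v.natAbs : Int) = v := Int.natAbs_of_nonneg hv0
  have hval : b * 256 ^ k + v = ((b.natAbs * 256 ^ k + v.natAbs : Nat) : Int) := by
    push_cast [hba, hva]; ring
  have hnatAbs : (b * 256 ^ k + v).natAbs = b.natAbs * 256 ^ k + v.natAbs := by
    rw [hval, Int.natAbs_natCast]
  have hvN : v.natAbs < 256 ^ k := by
    have := hv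
    rw [← hva] at this
    exact_mod_cast this
  have hbN : b.natAbs < 256 := by
    have := hb; rw [← hba] at this; exact_mod_cast this
  refine bitLength_unique _ (B + 8 * k) (by omega) ?_ ?_
  · rw [hnatAbs]
    have e : B + 8 * k - 1 = (B - 1) + 8 * k := by omega
    rw [e, pow_add, hpowN]
    calc 2 ^ (B-1) * 256 ^ k ≤ b.natAbs * 256 ^ k :=
          Nat.mul_le_mul_right _ hBle
      _ ≤ b.natAbs * 256 ^ k + v.natAbs := Nat.le_add_right _ _
  · rw [hnatAbs, pow_add, hpowN]
    calc b.natAbs * 256 ^ k + v.natAbs < b.natAbs * 256 ^ k + 256 ^ k := by omega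
      _ = (b.natAbs + 1) * 256 ^ k := by ring
      _ ≤ 2 ^ B * 256 ^ k := Nat.mul_le_mul_right _ (by omega)

theorem total_leading_zeros_spec : Claim_equal_total_leading_zeros := by
  intro hash hdom hpre
  unfold Spec_total_leading_zeros
  induction hash with
  | nil => decide
  | cons b rest ih =>
    have hv0 := foldl_be_nonneg rest
    have hv1 := foldl_be_lt rest
    set v := rest.foldl (fun acc b => acc * 256 + PySem.Int.band b 255) 0 with hvdef
    by_cases hb0 : b = 0
    · -- head element zero: A adds 8 and recurses; B's value is unchanged
      subst hb0
      have hdomr : Dom_total_leading_zeros rest := by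
        unfold Dom_total_leading_zeros at hdom ⊢
        simp only [List.all_cons, Bool.and_eq_true] at hdom
        exact hdom.2
      have hprer : Pre_total_leading_zeros rest := by
        unfold Pre_total_leading_zeros at hpre ⊢
        simpa [List.dropWhile_cons] using hpre
      have ihr := ih hdomr hprer
      have hval0 : (0 :: rest).foldl (fun acc b => acc * 256 + PySem.Int.band b 255) 0 = v := by
        have hz : (0:Int) * 256 + PySem.Int.band 0 255 = 0 := by
          rw [band255]
          decide
        rw [List.foldl_cons, hz]
      have hA : total_leading_zeros (0 :: rest) = 8 + total_leading_zeros rest := by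
        simp [total_leading_zeros, leading_zeros_port]
      rw [hA, ihr]
      simp only [total_leading_zeros_alt, hval0, ← hvdef, List.length_cons]
      by_cases hv : v = 0
      · simp [hv]; ring
      · simp [hv]; ring
    · -- head nonzero: A stops at this element; B's bit length splits off its low byte
      have hbm : b % 256 ≠ 0 := by
        unfold Pre_total_leading_zeros at hpre
        simp only [List.dropWhile_cons, beq_iff_eq, hb0] at hpre
        simpa [hb0] using hpre
      have hm0 : 0 ≤ b % 256 := Int.emod_nonneg b (by norm_num)
      have hm1 : b % 256 < 256 := Int.emod_lt_of_pos b (by norm_num)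
      have hblr := bl_range (b % 256).toNat (by omega) (by omega)
      have hblc : ((((b % 256).toNat : Nat)) : Int) = b % 256 := by omega
      rw [hblc] at hblr
      have hA : total_leading_zeros (b :: rest)
          = 8 - (PySem.Int.bitLength (b % 256) : Int) := by
        simp only [total_leading_zeros, lz_mod b hbm]
        rw [if_pos (by omega)]
      have hval : (b :: rest).foldl (fun acc b => acc * 256 + PySem.Int.band b 255) 0
          = (b % 256) * 256 ^ rest.length + v := by
        rw [List.foldl_cons, foldl_be, ← hvdef, band255]; ring
      have hnpos : 0 < (b % 256) * 256 ^ rest.length + v := by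
        have hp : (0:Int) < 256 ^ rest.length := by positivity
        have hm2 : (1:Int) ≤ b % 256 := by omega
        nlinarith [mul_le_mul_of_nonneg_right hm2 (le_of_lt hp)]
      have hsplit := bitLength_head (b % 256) v rest.length (by omega) hm1 hv0 hv1
      rw [hA]
      simp only [total_leading_zeros_alt, hval, List.length_cons]
      rw [if_neg (by simp; omega), hsplit]
      push_cast; ring
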